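-- pv_equiv track=rewrite | github.com/yourhonor1996/Learning-To-Code-And-ML | maktabsharif_Test/6.py | number_of_jumps
-- ===== SOURCE A (Python) =====
-- def loop_list(i:int, input_list:list):
--     length = len(input_list)
--     if(i<length):
--         return input_list[i]
--     if(i>= length):
--         return input_list[i % length]
--
-- def number_of_jumps(n:int, k:int):
--     number_list = list(range(n))
--     doIt = True
--     j = 0
--     count = 0
--     while (doIt):
--         j += k
--         count += 1
--         if(loop_list(j, number_list) == 0):
--             return count
-- ===== SOURCE B (Python) =====
-- def number_of_jumps(n: int, k: int):
--     # closed form: the walk returns to 0 after n // gcd(n, k) jumps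
--     g, r = abs(n), abs(k)
--     while r:
--         g, r = r, g % r
--     return n // g
-- ===== Notes on version B (the rewrite author's own statement) =====
-- stated objective: faster
-- what changed: B replaces A's step-by-step simulation of the circular walk with the closed form n // gcd(n, k) computed by Euclid's algorithm.
import Mathlib
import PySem

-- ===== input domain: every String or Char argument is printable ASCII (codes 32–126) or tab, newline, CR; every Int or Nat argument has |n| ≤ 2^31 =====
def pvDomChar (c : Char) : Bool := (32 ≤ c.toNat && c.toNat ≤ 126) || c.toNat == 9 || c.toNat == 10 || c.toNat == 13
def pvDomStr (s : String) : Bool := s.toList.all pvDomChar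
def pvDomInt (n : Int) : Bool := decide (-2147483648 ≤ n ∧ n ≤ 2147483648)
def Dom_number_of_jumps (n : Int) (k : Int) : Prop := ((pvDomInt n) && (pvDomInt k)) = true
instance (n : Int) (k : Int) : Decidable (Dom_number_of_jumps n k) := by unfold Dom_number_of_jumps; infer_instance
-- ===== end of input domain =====

-- B replaces A's step-by-step simulation of the circular walk by the closed form n // gcd(n,k)
-- (Euclid's algorithm); equivalence is proved on Pre_ = the inputs where A returns (n ≥ 1, and
-- for k < 0 additionally -k ∣ n: elsewhere A raises IndexError/ZeroDivisionError).


-- ===== PORT A =====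
-- Python list indexing xs[i], hand-ported exactly (negative i wraps once from the end; none = IndexError);
-- the list is held as an Array only so that each access is O(1) when the port is evaluated
def pyGetA? (xs : Array Int) (i : Int) : Option Int :=
  if 0 ≤ i then xs[i.toNat]?
  else if 0 ≤ i + (xs.size : Int) then xs[(i + (xs.size : Int)).toNat]? else none

-- loop_list; i % 0 raises → mod? = none
def loopListA (i : Int) (xs : Array Int) : Option Int :=
  if i < (xs.size : Int) then pyGetA? xs i
  else if (xs.size : Int) ≤ i then
    (PySem.Int.mod? i (xs.size : Int)).bind (fun m => pyGetA? xs m)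
  else none

-- the while-loop of A; none models a propagated exception; fuel n.toNat+1 always suffices on Pre_
def jumpLoopA (xs : Array Int) (k : Int) (j : Int) (count : Int) : Nat → Option Int
  | 0 => none
  | fuel + 1 =>
    let j' := j + k
    let count' := count + 1
    match loopListA j' xs with
    | none => none
    | some v => if v = 0 then some count' else jumpLoopA xs k j' count' fuel

def number_of_jumps (n : Int) (k : Int) : Int :=
  (jumpLoopA (PySem.List.pyRange 0 n 1).toArray k 0 0 (n.toNat + 1)).getD 0

-- ===== PORT B =====
-- Source B's Euclid loop: while r: g, r = r, g % r
-- structural fuel = r (r strictly decreases each iteration, so r iterations always suffice)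
def euclidGoB : Nat → Nat → Nat → Nat
  | _, g, 0 => g
  | 0, g, _ + 1 => g
  | f + 1, g, r + 1 => euclidGoB f (r + 1) (g % (r + 1))

def euclidLoopB (g r : Nat) : Nat := euclidGoB r g r

def number_of_jumps_alt (n : Int) (k : Int) : Int :=
  PySem.Int.floordiv n ((euclidLoopB n.natAbs k.natAbs : Nat) : Int)

-- ===== PRECONDITION & SPEC =====
-- Pre_ = exactly the inputs where A returns: n ≤ 0 always raises (empty list), and a backwards
-- walk (k < 0) raises IndexError unless -k divides n.
def Pre_number_of_jumps (n : Int) (k : Int) : Prop := 1 ≤ n ∧ (0 ≤ k ∨ (-k) ∣ n)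
instance (n : Int) (k : Int) : Decidable (Pre_number_of_jumps n k) := by unfold Pre_number_of_jumps; infer_instance
def pvWitness_number_of_jumps : Int × Int := (6, 4)

def Spec_number_of_jumps (n : Int) (k : Int) (out : Int) : Prop := out = number_of_jumps_alt n k
instance (n : Int) (k : Int) (out : Int) : Decidable (Spec_number_of_jumps n k out) := by unfold Spec_number_of_jumps; infer_instance

-- ===== CLAIM (what is proved, stated in full; the proofs are below) =====
def Claim_equal_number_of_jumps : Prop := ∀ (n : Int) (k : Int), Dom_number_of_jumps n k → Pre_number_of_jumps n k → Spec_number_of_jumps n k (number_of_jumps n k)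

-- ===== LEMMAS AND PROOFS =====

-- Source B's Euclid loop computes gcd
theorem euclidGoB_eq_gcd (f g r : Nat) (h : r ≤ f) : euclidGoB f g r = Nat.gcd r g := by
  induction f generalizing g r with
  | zero =>
    match r, h with
    | 0, _ => simp [euclidGoB]
  | succ f ih =>
    match r with
    | 0 => simp [euclidGoB]
    | r + 1 =>
      rw [euclidGoB, ih (r + 1) (g % (r + 1)) (by
            have := Nat.mod_lt g (show 0 < r + 1 by omega); omega)]
      exact (Nat.gcd_rec (r + 1) g).symm

theorem euclidLoopB_eq_gcd (g r : Nat) : euclidLoopB g r = Nat.gcd r g :=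
  euclidGoB_eq_gcd r g r le_rfl

theorem length_range_n (n : Int) :
    (((PySem.List.pyRange 0 n 1).toArray.size : Nat) : Int) = max n 0 := by
  rw [List.size_toArray, PySem.List.length_pyRange_one]; omega

-- reading the circular list: nonnegative index
theorem get_range_nonneg (n i : Int) (h0 : 0 ≤ i) (hlt : i < n) :
    pyGetA? (PySem.List.pyRange 0 n 1).toArray i = some i := by
  have hl := length_range_n n
  unfold pyGetA?
  rw [if_pos h0, List.getElem?_toArray,
      List.getElem?_eq_getElem (by rw [List.size_toArray] at hl; omega)]
  congr 1
  rw [PySem.List.getElem_pyRange_one]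
  omega

theorem loopA_nonneg (n i : Int) (h0 : 0 ≤ i) (hlt : i < n) :
    loopListA i (PySem.List.pyRange 0 n 1).toArray = some i := by
  have hl := length_range_n n
  unfold loopListA
  rw [if_pos (by omega)]
  exact get_range_nonneg n i h0 hlt

-- reading the circular list: negative index (Python wraps once)
theorem loopA_neg (n i : Int) (h0 : -n ≤ i) (hlt : i < 0) :
    loopListA i (PySem.List.pyRange 0 n 1).toArray = some (n + i) := by
  have hl := length_range_n n
  unfold loopListA
  rw [if_pos (by omega)]
  unfold pyGetA?
  rw [if_neg (by omega), if_pos (by omega), List.getElem?_toArray,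
      List.getElem?_eq_getElem (by rw [List.size_toArray] at hl ⊢; omega)]
  congr 1
  rw [PySem.List.getElem_pyRange_one]
  omega

-- reading the circular list: index beyond the end (i % n)
theorem loopA_ge (n i : Int) (hn : 1 ≤ n) (hi : n ≤ i) :
    loopListA i (PySem.List.pyRange 0 n 1).toArray = some (i % n) := by
  have hl := length_range_n n
  unfold loopListA
  rw [if_neg (by omega), if_pos (by omega)]
  have hlen : (((PySem.List.pyRange 0 n 1).toArray.size : Nat) : Int) = n := by omega
  rw [hlen]
  unfold PySem.Int.mod?
  rw [if_neg (by omega)]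
  have hfm : Int.fmod i n = i % n := by rw [Int.fmod_eq_emod]; simp [show (0:Int) ≤ n by omega]
  simp only [Option.bind_some, hfm]
  exact get_range_nonneg n (i % n) (Int.emod_nonneg _ (by omega)) (Int.emod_lt_of_pos _ (by omega))

-- the while-loop returns the first multiplier t of k whose position reads 0
theorem jumpLoopA_reaches (xs : Array Int) (k : Int) :
    ∀ (f c t : Nat), c < t → t ≤ c + f →
    (∀ d : Nat, c < d → d < t → ∃ v, loopListA ((d : Int) * k) xs = some v ∧ v ≠ 0) →
    loopListA ((t : Int) * k) xs = some 0 →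
    jumpLoopA xs k ((c : Int) * k) (c : Int) f = some (t : Int) := by
  intro f
  induction f with
  | zero => intro c t h1 h2 _ _; omega
  | succ f ih =>
    intro c t h1 h2 hmid hend
    rw [jumpLoopA]
    have hj : (c : Int) * k + k = ((c + 1 : Nat) : Int) * k := by push_cast; ring
    have hcnt : (c : Int) + 1 = ((c + 1 : Nat) : Int) := by push_cast; ring
    simp only [hj, hcnt]
    by_cases he : c + 1 = t
    · rw [he, hend]; simp
    · obtain ⟨v, hv, hv0⟩ := hmid (c + 1) (by omega) (by omega)
      rw [hv]
      simp only [if_neg hv0]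
      exact ih (c + 1) t (by omega) (by omega)
        (fun d hd1 hd2 => hmid d (by omega) hd2) hend

-- ===== VERDICT (by name: the statement is the Claim_ definition above) =====
-- the closed form: the loop stops exactly at t = n / gcd(n,k)
theorem number_of_jumps_spec : Claim_equal_number_of_jumps := by
  intro n k _ hpre
  obtain ⟨hn, hk⟩ := hpre
  unfold Spec_number_of_jumps number_of_jumps number_of_jumps_alt
  set R := (PySem.List.pyRange 0 n 1).toArray with hR
  set N := n.natAbs with hNdef
  have hNn : (N : Int) = n := by omega
  set K := k.natAbs with hKdef
  rw [euclidLoopB_eq_gcd]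
  -- helper to close each case: run the loop to its stopping time t
  have run : ∀ t : Nat, 0 < t → t ≤ N →
      (∀ d : Nat, 0 < d → d < t → ∃ v, loopListA ((d : Int) * k) R = some v ∧ v ≠ 0) →
      loopListA ((t : Int) * k) R = some 0 →
      (jumpLoopA R k 0 0 (n.toNat + 1)).getD 0 = (t : Int) := by
    intro t ht htN hmid hend
    have h := jumpLoopA_reaches R k (n.toNat + 1) 0 t ht (by omega) (fun d h1 h2 => hmid d h1 h2) hend
    simp only [Nat.cast_zero, zero_mul] at h
    rw [h]; rfl
  rcases lt_trichotomy k 0 with hkneg | hk0 | hkpos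
  · -- k < 0 : Pre_ gives (-k) ∣ n; the walk hits index -n after n / (-k) jumps
    have hdvd : (-k) ∣ n := hk.resolve_left (by omega)
    have hKpos : 0 < K := by omega
    have hKn : (K : Int) = -k := by omega
    have hDN : K ∣ N := by
      have : (K : Int) ∣ (N : Int) := by rw [hKn, hNn]; exact hdvd
      exact_mod_cast this
    set m := N / K with hm
    have hmK : m * K = N := Nat.div_mul_cancel hDN
    have hmpos : 0 < m := by
      rcases Nat.eq_zero_or_pos m with h | h
      · rw [h, Nat.zero_mul] at hmK; omega
      · exact h
    have hcast : (m : Int) * (K : Int) = (N : Int) := by exact_mod_cast hmK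
    have hA : (jumpLoopA R k 0 0 (n.toNat + 1)).getD 0 = (m : Int) := by
      apply run m hmpos (by calc m ≤ m * K := Nat.le_mul_of_pos_right m hKpos
                               _ = N := hmK)
      · intro d hd1 hd2
        have hdK : d * K < N := by rw [← hmK]; exact Nat.mul_lt_mul_of_pos_right hd2 hKpos
        have hdK1 : 1 ≤ d * K := Nat.one_le_iff_ne_zero.mpr (by positivity)
        have hi : (d : Int) * k = -((d * K : Nat) : Int) := by push_cast; rw [hKn]; ring
        refine ⟨n + (d : Int) * k, ?_, ?_⟩
        · rw [hi]
          exact loopA_neg n _ (by omega) (by omega)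
        · rw [hi]; omega
      · have hi : (m : Int) * k = -n := by
          rw [show (m : Int) * k = -((m : Int) * (K : Int)) from by rw [hKn]; ring, hcast, hNn]
        rw [hi]
        simpa using loopA_neg n (-n) (by omega) (by omega)
    rw [hA]
    have hgcd : Nat.gcd K N = K := Nat.gcd_eq_left hDN
    rw [hgcd, ← hNn, PySem.Int.floordiv_natCast]
  · -- k = 0 : the very first jump reads index 0, count = 1; gcd(n,0) = n
    have hA : (jumpLoopA R k 0 0 (n.toNat + 1)).getD 0 = ((1 : Nat) : Int) := by
      apply run 1 (by omega) (by omega)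
      · intro d h1 h2; omega
      · have h0 : ((1 : Nat) : Int) * k = 0 := by rw [hk0]; ring
        rw [h0]; simpa using loopA_nonneg n 0 le_rfl (by omega)
    rw [hA]
    have hK0 : K = 0 := by omega
    rw [hK0, Nat.gcd_zero_left, ← hNn, PySem.Int.floordiv_natCast, Nat.div_self (by omega)]
  · -- k > 0 : the first multiple of k divisible by n is reached at t = n / gcd(n,k)
    have hKpos : 0 < K := by omega
    have hKk : (K : Int) = k := by omega
    set g := Nat.gcd K N with hg
    have hgpos : 0 < g := Nat.gcd_pos_of_pos_left N hKpos
    have hgN : g ∣ N := Nat.gcd_dvd_right K N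
    have hgK : g ∣ K := Nat.gcd_dvd_left K N
    set t := N / g with ht
    set b := K / g with hb
    have hNt : N = t * g := (Nat.div_mul_cancel hgN).symm
    have hKb : K = b * g := (Nat.div_mul_cancel hgK).symm
    have htpos : 0 < t := by
      rcases Nat.eq_zero_or_pos t with h | h
      · rw [h, Nat.zero_mul] at hNt; omega
      · exact h
    have hbpos : 0 < b := by
      rcases Nat.eq_zero_or_pos b with h | h
      · rw [h, Nat.zero_mul] at hKb; omega
      · exact h
    have hcop : Nat.Coprime b t := Nat.coprime_div_gcd_div_gcd (m := K) (n := N) (by omega)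
    have hkey : t * K = N * b := by rw [hKb, hNt]; ring
    have hmin : ∀ d : Nat, 0 < d → d < t → ¬ N ∣ d * K := by
      intro d hd1 hd2 hdvd
      have h1 : t * g ∣ d * (b * g) := by rw [← hNt, ← hKb]; exact hdvd
      rcases h1 with ⟨c, hc⟩
      have h2 : t ∣ d * b := by
        refine ⟨c, Nat.eq_of_mul_eq_mul_left hgpos ?_⟩
        rw [show g * (d * b) = d * (b * g) from by ring, hc]; ring
      have h3 : t ∣ d := (Nat.Coprime.dvd_of_dvd_mul_right hcop.symm) h2
      have := Nat.le_of_dvd hd1 h3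
      omega
    have hA : (jumpLoopA R k 0 0 (n.toNat + 1)).getD 0 = (t : Int) := by
      apply run t htpos (Nat.div_le_self N g)
      · intro d hd1 hd2
        have hipos : (0 : Int) < (d : Int) * k := by positivity
        rcases lt_or_ge ((d : Int) * k) n with hlt | hge
        · exact ⟨(d : Int) * k, loopA_nonneg n _ (by omega) hlt, by omega⟩
        · refine ⟨(d : Int) * k % n, loopA_ge n _ (by omega) hge, ?_⟩
          intro h0
          have hdvdInt : n ∣ (d : Int) * k := Int.dvd_of_emod_eq_zero h0
          have hcd : N ∣ d * K := by
            have hi : (d : Int) * k = ((d * K : Nat) : Int) := by push_cast; rw [hKk]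
            have : ((N : Nat) : Int) ∣ ((d * K : Nat) : Int) := by rw [hNn, ← hi]; exact hdvdInt
            exact_mod_cast this
          exact hmin d hd1 hd2 hcd
      · have hi : (t : Int) * k = ((t * K : Nat) : Int) := by push_cast; rw [hKk]
        have hdvdI : n ∣ (t : Int) * k := by
          rw [hi, ← hNn]
          exact Int.natCast_dvd_natCast.mpr ⟨b, hkey⟩
        have hge : n ≤ (t : Int) * k := by
          have h1 : ((N : Nat) : Int) ≤ ((t * K : Nat) : Int) := by
            exact_mod_cast (by rw [hkey]; exact Nat.le_mul_of_pos_right N hbpos : N ≤ t * K)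
          omega
        rw [loopA_ge n _ (by omega) hge]
        rw [Int.emod_eq_zero_of_dvd hdvdI]
    rw [hA, ← hNn, PySem.Int.floordiv_natCast]
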